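-- pv_equiv track=rewrite | github.com/myspacecornelius/crawler-26-public | enrichment/page_extractors.py | _match_keywords
-- ===== SOURCE A (Python) =====
-- from typing import Dict, List, Optional, Set, Tuple
--
-- def _match_keywords(text: str, keyword_dict: Dict[str, List[str]]) -> Dict[str, int]:
--     """Match text against keyword buckets. Returns {bucket: match_count}."""
--     lower = text.lower()
--     results = {}
--     for bucket, keywords in keyword_dict.items():
--         count = sum(1 for kw in keywords if kw.lower() in lower)
--         if count > 0:
--             results[bucket] = count
--     return results
-- ===== SOURCE B (Python) =====
-- def _match_keywords(text, keyword_dict):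
--     """Match text against keyword buckets. Returns {bucket: match_count}."""
--     lower = text.lower()
--     n = len(lower)
--     lengths = set()
--     for keywords in keyword_dict.values():
--         for kw in keywords:
--             lengths.add(len(kw))
--     subs = set()
--     for L in lengths:
--         for i in range(n - L + 1):
--             subs.add(lower[i:i + L])
--     results = {}
--     for bucket, keywords in keyword_dict.items():
--         count = sum(1 for kw in keywords if kw.lower() in subs)
--         if count > 0:
--             results[bucket] = count
--     return results
-- ===== Notes on version B (the rewrite author's own statement) =====
-- stated objective: faster
-- what changed: Replaces the per-keyword substring scan ('kw.lower() in lower' for every keyword) by a hash-set index of all substrings of the lowered text whose lengths occur among the keywords, built once, so per-bucket counting becomes set-membership lookups.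
import Mathlib
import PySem

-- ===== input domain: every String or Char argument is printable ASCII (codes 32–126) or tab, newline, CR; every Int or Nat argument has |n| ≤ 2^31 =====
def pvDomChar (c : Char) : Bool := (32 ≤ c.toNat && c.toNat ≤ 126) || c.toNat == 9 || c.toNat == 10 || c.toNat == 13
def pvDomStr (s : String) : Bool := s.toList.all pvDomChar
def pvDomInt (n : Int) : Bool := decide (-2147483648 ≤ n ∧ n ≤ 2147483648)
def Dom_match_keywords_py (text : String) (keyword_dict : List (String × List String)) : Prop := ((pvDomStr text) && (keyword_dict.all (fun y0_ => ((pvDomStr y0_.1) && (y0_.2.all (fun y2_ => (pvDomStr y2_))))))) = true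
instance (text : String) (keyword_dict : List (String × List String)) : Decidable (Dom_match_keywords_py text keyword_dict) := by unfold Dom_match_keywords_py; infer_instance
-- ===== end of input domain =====

-- B replaces the per-keyword substring scan by a hash-set index of all text substrings of the
-- occurring keyword lengths, built once; per-bucket counting becomes set membership (measured faster in a timing run).

-- ===== PORT A =====
-- literal transliteration of A: lower the text, then for each bucket count keywords whose
-- lowercased form occurs in the lowered text ('kw.lower() in lower'), keeping positive counts.
def match_keywords_py (text : String) (keyword_dict : List (String × List String)) : List (String × Int) :=
  let lower := PySem.Str.lower text
  ((PySem.Dict.ofList keyword_dict).items.foldl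
    (fun (results : PySem.Dict String Int) bk =>
      let count : Int := bk.2.foldl
        (fun c kw => if PySem.Str.isIn (PySem.Str.lower kw) lower then c + 1 else c) 0
      if 0 < count then results.insert bk.1 count else results)
    PySem.Dict.empty).items

-- ===== PORT B =====
-- literal transliteration of Source B: collect the set of keyword lengths, build the set of all
-- substrings of the lowered text having one of those lengths, then count by set membership.
def match_keywords_py_alt (text : String) (keyword_dict : List (String × List String)) : List (String × Int) :=
  let lower := PySem.Str.lower text
  let n : Int := PySem.Str.len lower
  let d := PySem.Dict.ofList keyword_dict
  let lengths : PySem.Set Int :=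
    d.values.foldl (fun s keywords =>
      keywords.foldl (fun s kw => PySem.Set.add s (PySem.Str.len kw)) s) PySem.Set.empty
  let subs : PySem.Set String :=
    lengths.foldl (fun s L =>
      (PySem.List.pyRange 0 (n - L + 1)).foldl
        (fun s i => PySem.Set.add s (PySem.Str.slice lower (some i) (some (i + L)))) s)
      PySem.Set.empty
  (d.items.foldl
    (fun (results : PySem.Dict String Int) bk =>
      let count : Int := bk.2.foldl
        (fun c kw => if PySem.Set.contains subs (PySem.Str.lower kw) then c + 1 else c) 0
      if 0 < count then results.insert bk.1 count else results)
    PySem.Dict.empty).items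

-- ===== PRECONDITION & SPEC =====
def Spec_match_keywords_py (text : String) (keyword_dict : List (String × List String)) (out : List (String × Int)) : Prop := out = match_keywords_py_alt text keyword_dict
instance (text : String) (keyword_dict : List (String × List String)) (out : List (String × Int)) : Decidable (Spec_match_keywords_py text keyword_dict out) := by unfold Spec_match_keywords_py; infer_instance

-- ===== CLAIM (what is proved, stated in full; the proofs are below) =====
def Claim_equal_match_keywords_py : Prop := ∀ (text : String) (keyword_dict : List (String × List String)), Dom_match_keywords_py text keyword_dict → Spec_match_keywords_py text keyword_dict (match_keywords_py text keyword_dict)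

-- ===== LEMMAS AND PROOFS =====

-- membership in a fold that adds f a for every a of a list into a PySem.Set
theorem pv_mem_foldl_set_add {α β : Type} [BEq β] [LawfulBEq β]
    (l : List α) (f : α → β) (s : PySem.Set β) (x : β) :
    x ∈ l.foldl (fun s a => PySem.Set.add s (f a)) s ↔ x ∈ s ∨ ∃ a ∈ l, f a = x := by
  induction l generalizing s with
  | nil => simp
  | cons a t ih =>
    simp only [List.foldl_cons, ih, PySem.Set.mem_add, List.mem_cons]
    constructor
    · rintro ((h | h) | ⟨b, hb, rfl⟩)
      · exact Or.inl h
      · exact Or.inr ⟨a, Or.inl rfl, h.symm⟩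
      · exact Or.inr ⟨b, Or.inr hb, rfl⟩
    · rintro (h | ⟨b, (rfl | hb), rfl⟩)
      · exact Or.inl (Or.inl h)
      · exact Or.inl (Or.inr rfl)
      · exact Or.inr ⟨b, hb, rfl⟩

-- membership in a doubly nested add-fold
theorem pv_mem_foldl_foldl_set_add {α γ β : Type} [BEq β] [LawfulBEq β]
    (l : List α) (g : α → List γ) (f : α → γ → β) (s : PySem.Set β) (x : β) :
    x ∈ l.foldl (fun s a => (g a).foldl (fun s c => PySem.Set.add s (f a c)) s) s ↔
      x ∈ s ∨ ∃ a ∈ l, ∃ c ∈ g a, f a c = x := by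
  induction l generalizing s with
  | nil => simp
  | cons a t ih =>
    simp only [List.foldl_cons, ih, pv_mem_foldl_set_add, List.mem_cons]
    constructor
    · rintro ((h | ⟨c, hc, rfl⟩) | ⟨b, hb, hcc⟩)
      · exact Or.inl h
      · exact Or.inr ⟨a, Or.inl rfl, c, hc, rfl⟩
      · exact Or.inr ⟨b, Or.inr hb, hcc⟩
    · rintro (h | ⟨b, (rfl | hb), hcc⟩)
      · exact Or.inl (Or.inl h)
      · exact Or.inl (Or.inr hcc)
      · exact Or.inr ⟨b, hb, hcc⟩

-- the crux: membership of kw.lower() in the substring index equals 'kw.lower() in lower'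
theorem pv_contains_subs_eq_isIn (lower : String) (lengths : PySem.Set Int)
    (kw : String)
    (hL : PySem.Str.len kw ∈ lengths)
    (hnn : ∀ L ∈ lengths, 0 ≤ L) :
    PySem.Set.contains
      (lengths.foldl (fun s L =>
        (PySem.List.pyRange 0 (PySem.Str.len lower - L + 1)).foldl
          (fun s i => PySem.Set.add s (PySem.Str.slice lower (some i) (some (i + L)))) s)
        PySem.Set.empty)
      (PySem.Str.lower kw)
      = PySem.Str.isIn (PySem.Str.lower kw) lower := by
  rw [Bool.eq_iff_iff, PySem.Set.contains_iff,
      pv_mem_foldl_foldl_set_add lengths (fun L => PySem.List.pyRange 0 (PySem.Str.len lower - L + 1))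
        (fun L i => PySem.Str.slice lower (some i) (some (i + L))) PySem.Set.empty]
  constructor
  · rintro (h | ⟨L, hLm, i, hi, hslice⟩)
    · exact absurd h (by simp [PySem.Set.empty])
    · have h0i : 0 ≤ i := (PySem.List.mem_pyRange_one.mp hi).1
      have h0L : 0 ≤ L := hnn L hLm
      have hlist : (PySem.Str.slice lower (some i) (some (i + L))).toList = (PySem.Str.lower kw).toList :=
        congrArg String.toList hslice
      rw [PySem.Str.toList_slice, PySem.Chars.slice_eq_listSlice,
          PySem.List.slice_toNat lower.toList h0i (by omega)] at hlist
      rw [PySem.Str.isIn_eq]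
      exact (PySem.Chars.exists_prefix_drop_iff_isIn _ _).mp
        ⟨i.toNat, hlist ▸ List.take_prefix _ _⟩
  · intro h
    rw [PySem.Str.isIn_eq] at h
    obtain ⟨j, hpre⟩ := (PySem.Chars.exists_prefix_drop_iff_isIn _ _).mpr h
    -- replace j by j' = min j (length), preserving the prefix property
    set lw := lower.toList with hlw
    set wl := (PySem.Str.lower kw).toList with hwl
    have hpre' : wl <+: lw.drop (min j lw.length) := by
      rcases le_total j lw.length with hle | hle
      · rwa [min_eq_left hle]
      · have hnil : lw.drop j = [] := List.drop_eq_nil_iff.mpr hle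
        have : wl = [] := List.prefix_nil.mp (hnil ▸ hpre)
        simp [this]
    set j' := min j lw.length with hj'
    have hj'le : j' ≤ lw.length := min_le_right _ _
    have hlen : wl.length + j' ≤ lw.length := by
      have := hpre'.length_le
      rw [List.length_drop] at this
      omega
    have hwlen : wl.length = kw.toList.length := by
      rw [hwl, PySem.Str.toList_lower]
      simp [PySem.Chars.lower]
    refine Or.inr ⟨PySem.Str.len kw, hL, (j' : Int), ?_, ?_⟩
    · rw [PySem.List.mem_pyRange_one]
      rw [PySem.Str.len_eq, PySem.Str.len_eq]
      constructor
      · exact_mod_cast Nat.zero_le j'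
      · rw [← hlw]
        omega
    · apply String.toList_inj.mp
      rw [PySem.Str.toList_slice, PySem.Chars.slice_eq_listSlice,
          PySem.List.slice_toNat lw (by exact_mod_cast Nat.zero_le j')
            (by rw [PySem.Str.len_eq]; positivity)]
      have harg : ((j' : Int) + PySem.Str.len kw).toNat - (j' : Int).toNat = wl.length := by
        rw [PySem.Str.len_eq, hwlen]
        omega
      rw [harg, Int.toNat_natCast]
      exact (List.prefix_iff_eq_take.mp hpre').symm

-- the shared bucket loop, congruent in the per-keyword predicate
theorem pv_bucket_loop_congr (p q : String → Bool) (items : List (String × List String))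
    (h : ∀ bk ∈ items, ∀ kw ∈ bk.2, p kw = q kw) :
    (items.foldl
      (fun (results : PySem.Dict String Int) bk =>
        let count : Int := bk.2.foldl (fun c kw => if p kw then c + 1 else c) 0
        if 0 < count then results.insert bk.1 count else results)
      PySem.Dict.empty).items
    = (items.foldl
      (fun (results : PySem.Dict String Int) bk =>
        let count : Int := bk.2.foldl (fun c kw => if q kw then c + 1 else c) 0
        if 0 < count then results.insert bk.1 count else results)
      PySem.Dict.empty).items := by
  apply congrArg PySem.Dict.items
  apply PySem.List.foldl_congr_mem
  intro acc bk hbk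
  have hcount : bk.2.foldl (fun (c : Int) kw => if p kw then c + 1 else c) 0
      = bk.2.foldl (fun (c : Int) kw => if q kw then c + 1 else c) 0 :=
    PySem.List.foldl_congr_mem _ _ _ _ (fun c kw hkw => by rw [h bk hbk kw hkw])
  have hstep : ∀ (x y : Int), x = y →
      (if 0 < x then acc.insert bk.1 x else acc) = (if 0 < y then acc.insert bk.1 y else acc) :=
    fun x y hxy => by rw [hxy]
  exact hstep _ _ hcount

theorem pv_main (text : String) (keyword_dict : List (String × List String)) :
    match_keywords_py text keyword_dict = match_keywords_py_alt text keyword_dict := by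
  unfold match_keywords_py match_keywords_py_alt
  refine pv_bucket_loop_congr _ _ _ ?_
  intro bk hbk kw hkw
  symm
  have hL : PySem.Str.len kw ∈
      (PySem.Dict.ofList keyword_dict).values.foldl
        (fun s keywords => keywords.foldl (fun s kw => PySem.Set.add s (PySem.Str.len kw)) s)
        PySem.Set.empty := by
    rw [pv_mem_foldl_foldl_set_add _ (fun keywords => keywords) (fun _ kw => PySem.Str.len kw)]
    exact Or.inr ⟨bk.2, List.mem_map_of_mem hbk, kw, hkw, rfl⟩
  have hnn : ∀ L ∈
      (PySem.Dict.ofList keyword_dict).values.foldl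
        (fun s keywords => keywords.foldl (fun s kw => PySem.Set.add s (PySem.Str.len kw)) s)
        PySem.Set.empty, 0 ≤ L := by
    intro L hLm
    rw [pv_mem_foldl_foldl_set_add _ (fun keywords => keywords) (fun _ kw => PySem.Str.len kw)] at hLm
    rcases hLm with h | ⟨_, _, kw', _, rfl⟩
    · exact absurd h (by simp [PySem.Set.empty])
    · rw [PySem.Str.len_eq]; positivity
  exact pv_contains_subs_eq_isIn (PySem.Str.lower text) _ kw hL hnn

-- ===== VERDICT (by name: the statement is the Claim_ definition above) =====
theorem match_keywords_py_spec : Claim_equal_match_keywords_py := by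
  intro text keyword_dict _
  exact pv_main text keyword_dict
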